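-- pv_equiv track=rewrite | github.com/pypi-data/pypi-mirror-404 | packages/cosmic-chunker/cosmic_chunker-1.1.0-py3-none-any.whl/cosmic/pipeline/reference.py | _build_sentence_chunk_map
-- ===== SOURCE A (Python) =====
-- def _build_sentence_chunk_map(
--
--     num_sentences: int,
--     boundaries: list[int],
-- ) -> dict[int, int]:
--     """Map sentence indices to chunk indices."""
--     mapping = {}
--     chunk_idx = 0
--
--     for sent_idx in range(num_sentences):
--         # Move to next chunk if we've passed its boundary
--         while chunk_idx < len(boundaries) - 1 and sent_idx >= boundaries[chunk_idx + 1]: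
--             chunk_idx += 1
--         mapping[sent_idx] = chunk_idx
--
--     return mapping
-- ===== SOURCE B (Python) =====
-- def _build_sentence_chunk_map(num_sentences, boundaries):
--     """Map sentence indices to chunk indices."""
--     if num_sentences <= 0:
--         return {}
--     # starts[t] counts the boundaries after the first whose clamped value is t;
--     # a running prefix sum of starts gives, per sentence, how many of them are <= it.
--     starts = [0] * (num_sentences + 1)
--     for b in boundaries[1:]:
--         starts[min(max(b, 0), num_sentences)] += 1
--     mapping = {}
--     chunk = 0
--     for s in range(num_sentences):
--         chunk += starts[s]
--         mapping[s] = chunk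
--     return mapping
-- ===== Notes on version B (the rewrite author's own statement) =====
-- stated objective: alternative
-- what changed: Replaces A's stateful chunk-pointer sweep (outer for with an inner while advancing chunk_idx) by a histogram of the clamped boundaries after the first plus a running prefix sum, so each sentence's chunk index is the number of those boundaries <= it.
-- outside the precondition, e.g. on _build_sentence_chunk_map(3, [0, 9, 1]): A returns {0: 0, 1: 0, 2: 0}, B returns {0: 0, 1: 1, 2: 1}
import Mathlib
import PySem

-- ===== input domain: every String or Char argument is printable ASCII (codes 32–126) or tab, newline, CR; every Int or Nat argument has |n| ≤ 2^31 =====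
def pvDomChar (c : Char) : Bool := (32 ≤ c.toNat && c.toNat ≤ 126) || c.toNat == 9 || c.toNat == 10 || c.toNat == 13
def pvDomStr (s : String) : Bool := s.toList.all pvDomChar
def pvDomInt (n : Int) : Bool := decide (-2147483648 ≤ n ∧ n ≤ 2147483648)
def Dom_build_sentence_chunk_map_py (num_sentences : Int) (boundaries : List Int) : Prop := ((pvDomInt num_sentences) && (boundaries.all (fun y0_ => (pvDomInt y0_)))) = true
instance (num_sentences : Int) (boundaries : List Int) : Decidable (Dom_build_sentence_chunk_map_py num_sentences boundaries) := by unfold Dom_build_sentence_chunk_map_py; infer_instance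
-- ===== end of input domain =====

-- B replaces A's stateful chunk-pointer sweep by a histogram of the clamped boundaries after the
-- first plus a running prefix sum: each sentence's chunk index is the number of those boundaries ≤ it.


-- ===== PORT A =====
-- A's inner 'while chunk_idx < len(boundaries) - 1 and sent_idx >= boundaries[chunk_idx + 1]'.
-- fuel = boundaries.length bounds its iterations (chunk_idx stays below len - 1); the guard keeps
-- chunk_idx + 1 in range, so pyGetD is exactly Python's boundaries[chunk_idx + 1] here.
def pvAdvance (boundaries : List Int) (sent_idx : Int) : Nat → Int → Int
  | 0, chunk_idx => chunk_idx
  | fuel + 1, chunk_idx =>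
    if chunk_idx < (boundaries.length : Int) - 1 ∧ PySem.List.pyGetD boundaries (chunk_idx + 1) 0 ≤ sent_idx then
      pvAdvance boundaries sent_idx fuel (chunk_idx + 1)
    else chunk_idx

-- the dict keys sent_idx are distinct and visited in increasing order, so 'mapping[sent_idx] = chunk_idx' appends the pair
def build_sentence_chunk_map_py (num_sentences : Int) (boundaries : List Int) : List (Int × Int) :=
  ((PySem.List.pyRange 0 num_sentences 1).foldl
    (fun (st : List (Int × Int) × Int) sent_idx =>
      let chunk_idx := pvAdvance boundaries sent_idx boundaries.length st.2
      (st.1 ++ [(sent_idx, chunk_idx)], chunk_idx))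
    ([], 0)).1

-- ===== PORT B =====
-- B's histogram 'starts': starts[min(max(b, 0), num_sentences)] += 1 for b in boundaries[1:]
def pvStarts (num_sentences : Int) (boundaries : List Int) : List Int :=
  (PySem.List.slice boundaries (some 1) none).foldl
    (fun starts b =>
      PySem.List.pySetD starts (min (max b 0) num_sentences)
        (PySem.List.pyGetD starts (min (max b 0) num_sentences) 0 + 1))
    (PySem.List.pyRepeat [(0 : Int)] (num_sentences + 1))

-- the dict keys s are distinct and visited in increasing order, so 'mapping[s] = chunk' appends the pair
def build_sentence_chunk_map_py_alt (num_sentences : Int) (boundaries : List Int) : List (Int × Int) :=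
  if num_sentences ≤ 0 then []
  else
    let starts := pvStarts num_sentences boundaries
    ((PySem.List.pyRange 0 num_sentences 1).foldl
      (fun (st : List (Int × Int) × Int) s =>
        let chunk := st.2 + PySem.List.pyGetD starts s 0
        (st.1 ++ [(s, chunk)], chunk))
      ([], 0)).1

-- ===== PRECONDITION & SPEC =====
-- Pre_ restricts to the function's natural domain: the chunk boundaries after the first (the only
-- ones either program reads) are non-decreasing. On unsorted boundaries A's stateful pointer sweep
-- yields history-dependent values that B's count does not reproduce (A still returns there, but
-- either value is an accident of traversal order).
def Pre_build_sentence_chunk_map_py (num_sentences : Int) (boundaries : List Int) : Prop :=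
  boundaries.tail.Pairwise (· ≤ ·)
instance (num_sentences : Int) (boundaries : List Int) : Decidable (Pre_build_sentence_chunk_map_py num_sentences boundaries) := by unfold Pre_build_sentence_chunk_map_py; infer_instance

def pvWitness_build_sentence_chunk_map_py : Int × List Int := (3, [0, 2])

def Spec_build_sentence_chunk_map_py (num_sentences : Int) (boundaries : List Int) (out : List (Int × Int)) : Prop := out = build_sentence_chunk_map_py_alt num_sentences boundaries
instance (num_sentences : Int) (boundaries : List Int) (out : List (Int × Int)) : Decidable (Spec_build_sentence_chunk_map_py num_sentences boundaries out) := by unfold Spec_build_sentence_chunk_map_py; infer_instance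

-- ===== CLAIM (what is proved, stated in full; the proofs are below) =====
def Claim_equal_build_sentence_chunk_map_py : Prop := ∀ (num_sentences : Int) (boundaries : List Int), Dom_build_sentence_chunk_map_py num_sentences boundaries → Pre_build_sentence_chunk_map_py num_sentences boundaries → Spec_build_sentence_chunk_map_py num_sentences boundaries (build_sentence_chunk_map_py num_sentences boundaries)

-- ===== LEMMAS AND PROOFS =====

-- the common value: the number of elements of boundaries[1:] that are ≤ s
def pvCnt (boundaries : List Int) (s : Int) : Int :=
  (boundaries.tail.countP (fun b => decide (b ≤ s)) : Int)

lemma pvCountP_le_len (bs : List Int) (s : Int) :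
    bs.tail.countP (fun b => decide (b ≤ s)) ≤ bs.tail.length := by
  exact List.countP_le_length

lemma pvCountP_mono (bs : List Int) {s t : Int} (h : s ≤ t) :
    bs.tail.countP (fun b => decide (b ≤ s)) ≤ bs.tail.countP (fun b => decide (b ≤ t)) :=
  List.countP_mono_left (fun x _ hx => by
    simp only [decide_eq_true_eq] at hx ⊢; omega)

-- on a sorted list, an element is ≤ s exactly when its index is below the count of elements ≤ s
lemma sorted_getElem_le_iff (l : List Int) (s : Int) (h : l.Pairwise (· ≤ ·)) :
    ∀ (k : Nat) (hk : k < l.length), (l[k] ≤ s ↔ k < l.countP (fun b => decide (b ≤ s))) := by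
  induction l with
  | nil => intro k hk; simp at hk
  | cons b t ih =>
    rcases List.pairwise_cons.mp h with ⟨hb, ht⟩
    intro k hk
    by_cases hbs : b ≤ s
    · have hc : (b :: t).countP (fun x => decide (x ≤ s))
          = t.countP (fun x => decide (x ≤ s)) + 1 := by
        simp [hbs]
      cases k with
      | zero => simp [hbs, hc]
      | succ k =>
        have hk' : k < t.length := by simpa using hk
        have := ih ht k hk'
        simp only [List.getElem_cons_succ, hc]
        omega
    · have h0 : t.countP (fun x => decide (x ≤ s)) = 0 :=
        List.countP_eq_zero.mpr (fun x hx => by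
          simp only [decide_eq_true_eq]
          have := hb x hx
          omega)
      have hc : (b :: t).countP (fun x => decide (x ≤ s)) = 0 := by
        simp [hbs, h0]
      cases k with
      | zero => simp [hbs, hc]
      | succ k =>
        have hk' : k < t.length := by simpa using hk
        have hts : ¬ t[k] ≤ s := by
          have := hb t[k] (List.getElem_mem hk')
          omega
        simp [hc, List.getElem_cons_succ, hts]

-- A's while loop, started at any chunk index not past the count, lands exactly on the count
lemma pvAdvance_eq (bs : List Int) (s : Int) (h : bs.tail.Pairwise (· ≤ ·)) :
    ∀ (fuel k : Nat), k ≤ bs.tail.countP (fun b => decide (b ≤ s)) →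
      bs.tail.countP (fun b => decide (b ≤ s)) - k ≤ fuel →
      pvAdvance bs s fuel (k : Int) = pvCnt bs s := by
  intro fuel
  induction fuel with
  | zero =>
    intro k h1 h2
    have hke : k = bs.tail.countP (fun b => decide (b ≤ s)) := by omega
    simp only [pvAdvance, pvCnt, hke]
  | succ fuel ih =>
    intro k h1 h2
    have hcle := pvCountP_le_len bs s
    have hguard : ((k : Int) < (bs.length : Int) - 1 ∧
        PySem.List.pyGetD bs ((k : Int) + 1) 0 ≤ s)
        ↔ k < bs.tail.countP (fun b => decide (b ≤ s)) := by
      have hlt : bs.tail.length + 1 = bs.length ∨ bs = [] := by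
        cases bs <;> simp
      have hidx : ∀ (hk1 : k + 1 < bs.length),
          PySem.List.pyGetD bs ((k : Int) + 1) 0 = bs.tail[k]'(by rcases hlt with hl | hl <;> simp_all <;> omega) := by
        intro hk1
        rw [show ((k : Int) + 1) = ((k + 1 : Nat) : Int) by push_cast; ring,
            PySem.List.pyGetD_eq_getElem bs 0 (by positivity) (by exact_mod_cast hk1)]
        rw [List.getElem_tail]
        congr 1
      constructor
      · rintro ⟨hg1, hg2⟩
        have hk1 : k + 1 < bs.length := by omega
        rw [hidx hk1] at hg2
        refine (sorted_getElem_le_iff bs.tail s h k ?_).mp hg2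
        rcases hlt with hl | hl <;> simp_all <;> omega
      · intro hk
        have hkt : k < bs.tail.length := lt_of_lt_of_le hk hcle
        have hk1 : k + 1 < bs.length := by
          rcases hlt with hl | hl <;> simp_all <;> omega
        refine ⟨by omega, ?_⟩
        rw [hidx hk1]
        exact (sorted_getElem_le_iff bs.tail s h k hkt).mpr hk
    by_cases hk : k < bs.tail.countP (fun b => decide (b ≤ s))
    · rw [pvAdvance, if_pos (hguard.mpr hk),
          show ((k : Int) + 1) = ((k + 1 : Nat) : Int) by push_cast; ring]
      exact ih (k + 1) (by omega) (by omega)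
    · rw [pvAdvance, if_neg (by rw [hguard]; omega)]
      have hke : k = bs.tail.countP (fun b => decide (b ≤ s)) := by omega
      simp only [pvCnt, hke]

-- A's outer for loop: after the sentences 0 … m-1, the pair list holds the per-sentence counts and
-- the pointer sits at the last sentence's count
lemma pvLoopInvA (bs : List Int) (h : bs.tail.Pairwise (· ≤ ·)) :
    ∀ (m : Nat),
      (PySem.List.pyRange 0 (m : Int) 1).foldl
        (fun (st : List (Int × Int) × Int) sent_idx =>
          let chunk_idx := pvAdvance bs sent_idx bs.length st.2
          (st.1 ++ [(sent_idx, chunk_idx)], chunk_idx))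
        ([], 0)
      = ((PySem.List.pyRange 0 (m : Int) 1).map (fun s => (s, pvCnt bs s)),
         if m = 0 then 0 else pvCnt bs ((m : Int) - 1)) := by
  intro m
  induction m with
  | zero => simp [PySem.List.pyRange_one_eq_nil]
  | succ m ih =>
    have hcast : ((m + 1 : Nat) : Int) = (m : Int) + 1 := by push_cast; ring
    rw [hcast, PySem.List.pyRange_one_succ_right (by positivity), List.foldl_append, ih,
        List.map_append]
    have hstate : (if m = 0 then (0 : Int) else pvCnt bs ((m : Int) - 1))
        = ((if m = 0 then 0 else bs.tail.countP (fun b => decide (b ≤ (m : Int) - 1)) : Nat) : Int) := by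
      by_cases hm : m = 0 <;> simp [hm, pvCnt]
    have hadv : pvAdvance bs (m : Int) bs.length
        (if m = 0 then (0 : Int) else pvCnt bs ((m : Int) - 1)) = pvCnt bs (m : Int) := by
      rw [hstate]
      refine pvAdvance_eq bs (m : Int) h bs.length _ ?_ ?_
      · by_cases hm : m = 0
        · simp [hm]
        · rw [if_neg hm]
          exact pvCountP_mono bs (by omega)
      · have h1 := pvCountP_le_len bs (m : Int)
        have h2 : bs.tail.length ≤ bs.length := by cases bs <;> simp
        omega
    simp only [List.foldl_cons, List.foldl_nil, hadv]
    have hsnd : (if m + 1 = 0 then (0 : Int) else pvCnt bs ((m : Int) + 1 - 1))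
        = pvCnt bs (m : Int) := by
      rw [if_neg (Nat.succ_ne_zero m)]
      congr 1
      ring
    rw [Prod.mk.injEq]
    exact ⟨by simp, by rw [← hsnd]⟩

-- B's histogram loop: each slot of starts counts the elements whose clamped value is that index
lemma pvStartsFold (n : Int) (hn : 0 < n) (l : List Int) :
    ∀ (init : List Int), init.length = n.toNat + 1 →
      ((l.foldl
          (fun starts b =>
            PySem.List.pySetD starts (min (max b 0) n)
              (PySem.List.pyGetD starts (min (max b 0) n) 0 + 1)) init).length = n.toNat + 1
       ∧ ∀ (t : Nat), t < n.toNat + 1 →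
          PySem.List.pyGetD
            (l.foldl
              (fun starts b =>
                PySem.List.pySetD starts (min (max b 0) n)
                  (PySem.List.pyGetD starts (min (max b 0) n) 0 + 1)) init) (t : Int) 0
          = PySem.List.pyGetD init (t : Int) 0
            + (l.countP (fun b => decide (min (max b 0) n = (t : Int))) : Int)) := by
  induction l with
  | nil =>
    intro init hlen
    exact ⟨hlen, fun t _ => by simp⟩
  | cons b l ih =>
    intro init hlen
    have hclamp0 : 0 ≤ min (max b 0) n := by omega
    have hclampn : min (max b 0) n ≤ n := by omega
    have hival : min (max b 0) n = ((min (max b 0) n).toNat : Int) := by omega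
    have hitn : (min (max b 0) n).toNat < init.length := by omega
    have hlen' : (PySem.List.pySetD init (min (max b 0) n)
        (PySem.List.pyGetD init (min (max b 0) n) 0 + 1)).length = n.toNat + 1 := by
      rw [PySem.List.length_pySetD, hlen]
    obtain ⟨hl, hg⟩ := ih _ hlen'
    refine ⟨by simpa [List.foldl_cons] using hl, fun t ht => ?_⟩
    rw [List.foldl_cons, hg t ht]
    have hset := PySem.List.pyGetD_pySetD_natCast init (min (max b 0) n).toNat t
      (PySem.List.pyGetD init (min (max b 0) n) 0 + 1) 0 hitn
    rw [← hival] at hset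
    rw [hset, List.countP_cons]
    by_cases he : min (max b 0) n = (t : Int)
    · have ht' : t = (min (max b 0) n).toNat := by omega
      rw [if_pos ht', if_pos (by simpa using he)]
      rw [ht', ← hival]
      push_cast
      ring
    · have ht' : ¬ t = (min (max b 0) n).toNat := by omega
      rw [if_neg ht', if_neg (by simpa using he)]
      push_cast
      ring

-- counting ≤ s splits into counting ≤ s-1 and counting = s
lemma pvCount_split (l : List Int) (s : Int) :
    l.countP (fun b => decide (b ≤ s))
      = l.countP (fun b => decide (b ≤ s - 1)) + l.countP (fun b => decide (b = s)) := by
  induction l with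
  | nil => rfl
  | cons c t ih =>
    simp only [List.countP_cons, ih, decide_eq_true_eq]
    by_cases h1 : c ≤ s - 1
    · rw [if_pos (show c ≤ s by omega), if_pos h1, if_neg (show ¬ c = s by omega)]
      omega
    · by_cases h2 : c = s
      · rw [if_pos (show c ≤ s by omega), if_neg h1, if_pos h2]
        omega
      · rw [if_neg (show ¬ c ≤ s by omega), if_neg h1, if_neg h2]
        omega

-- B's prefix-sum loop: the running chunk value is exactly the count of boundaries[1:] ≤ s
lemma pvLoopInvB (bs : List Int) (n : Int) (hn : 0 < n) (starts : List Int)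
    (hstart : ∀ (t : Nat), t < n.toNat + 1 →
      PySem.List.pyGetD starts (t : Int) 0
        = (bs.tail.countP (fun b => decide (min (max b 0) n = (t : Int))) : Int)) :
    ∀ (m : Nat), m ≤ n.toNat →
      (PySem.List.pyRange 0 (m : Int) 1).foldl
        (fun (st : List (Int × Int) × Int) s =>
          let chunk := st.2 + PySem.List.pyGetD starts s 0
          (st.1 ++ [(s, chunk)], chunk))
        ([], 0)
      = ((PySem.List.pyRange 0 (m : Int) 1).map (fun s => (s, pvCnt bs s)),
         if m = 0 then 0 else pvCnt bs ((m : Int) - 1)) := by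
  intro m
  induction m with
  | zero => intro _; simp [PySem.List.pyRange_one_eq_nil]
  | succ m ih =>
    intro hm
    have hcast : ((m + 1 : Nat) : Int) = (m : Int) + 1 := by push_cast; ring
    rw [hcast, PySem.List.pyRange_one_succ_right (by positivity), List.foldl_append,
        ih (by omega), List.map_append]
    have hmn : (m : Int) < n := by omega
    have hsm : PySem.List.pyGetD starts (m : Int) 0
        = (bs.tail.countP (fun b => decide (min (max b 0) n = (m : Int))) : Int) :=
      hstart m (by omega)
    have hchunk : (if m = 0 then (0 : Int) else pvCnt bs ((m : Int) - 1))
        + PySem.List.pyGetD starts (m : Int) 0 = pvCnt bs (m : Int) := by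
      rw [hsm]
      by_cases hm0 : m = 0
      · subst hm0
        rw [if_pos rfl, zero_add]
        unfold pvCnt
        congr 1
        exact List.countP_congr (fun b _ => by
          simp only [decide_eq_true_eq]
          constructor <;> intro <;> omega)
      · rw [if_neg hm0]
        have hm1 : 1 ≤ (m : Int) := by omega
        have heq : bs.tail.countP (fun b => decide (min (max b 0) n = (m : Int)))
            = bs.tail.countP (fun b => decide (b = (m : Int))) :=
          List.countP_congr (fun b _ => by
            simp only [decide_eq_true_eq]
            constructor <;> intro <;> omega)
        have hsplit := pvCount_split bs.tail (m : Int)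
        unfold pvCnt
        rw [heq]
        push_cast [hsplit]
        ring
    simp only [List.foldl_cons, List.foldl_nil, hchunk]
    have hsnd : (if m + 1 = 0 then (0 : Int) else pvCnt bs ((m : Int) + 1 - 1))
        = pvCnt bs (m : Int) := by
      rw [if_neg (Nat.succ_ne_zero m)]
      congr 1
      ring
    rw [Prod.mk.injEq]
    exact ⟨by simp, by rw [← hsnd]⟩

-- B's fold on a positive sentence count equals the per-sentence count map
lemma alt_pos (N : Nat) (hN : 0 < N) (boundaries : List Int) :
    ((PySem.List.pyRange 0 (N : Int) 1).foldl
      (fun (st : List (Int × Int) × Int) s =>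
        let chunk := st.2 + PySem.List.pyGetD (pvStarts (N : Int) boundaries) s 0
        (st.1 ++ [(s, chunk)], chunk))
      ([], 0)).1
    = (PySem.List.pyRange 0 (N : Int) 1).map (fun s => (s, pvCnt boundaries s)) := by
  have htn : ((N : Int)).toNat = N := by omega
  have hrep : (PySem.List.pyRepeat [(0 : Int)] ((N : Int) + 1)).length
      = ((N : Int)).toNat + 1 := by
    rw [PySem.List.pyRepeat_singleton, List.length_replicate]
    omega
  obtain ⟨hl, hg⟩ := pvStartsFold (N : Int) (by exact_mod_cast hN)
    (PySem.List.slice boundaries (some 1) none) _ hrep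
  have hstart : ∀ (t : Nat), t < ((N : Int)).toNat + 1 →
      PySem.List.pyGetD (pvStarts (N : Int) boundaries) (t : Int) 0
        = (boundaries.tail.countP
            (fun b => decide (min (max b 0) (N : Int) = (t : Int))) : Int) := by
    intro t ht
    unfold pvStarts
    rw [hg t ht, PySem.List.pyRepeat_singleton,
        PySem.List.pyGetD_eq_getElem _ 0 (by positivity)
          (by rw [List.length_replicate]; omega),
        List.getElem_replicate, PySem.List.slice_from_one]
    ring
  have := pvLoopInvB boundaries (N : Int) (by exact_mod_cast hN)
    (pvStarts (N : Int) boundaries) hstart N (by omega)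
  rw [this]

-- B equals the per-sentence count map
lemma alt_eq_map (num_sentences : Int) (boundaries : List Int) :
    build_sentence_chunk_map_py_alt num_sentences boundaries
      = (PySem.List.pyRange 0 num_sentences 1).map (fun s => (s, pvCnt boundaries s)) := by
  unfold build_sentence_chunk_map_py_alt
  by_cases hn : num_sentences ≤ 0
  · rw [if_pos hn, PySem.List.pyRange_one_eq_nil hn]
    simp
  · rw [if_neg hn]
    have hm : num_sentences = (num_sentences.toNat : Int) := by omega
    rw [hm]
    exact alt_pos num_sentences.toNat (by omega) boundaries

-- ===== VERDICT (by name: the statement is the Claim_ definition above) =====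
theorem build_sentence_chunk_map_py_spec : Claim_equal_build_sentence_chunk_map_py := by
  intro num_sentences boundaries _dom hpre
  show build_sentence_chunk_map_py num_sentences boundaries
      = build_sentence_chunk_map_py_alt num_sentences boundaries
  rw [alt_eq_map]
  by_cases hn : num_sentences ≤ 0
  · unfold build_sentence_chunk_map_py
    simp [PySem.List.pyRange_one_eq_nil hn]
  · have hm : num_sentences = (num_sentences.toNat : Int) := by omega
    unfold build_sentence_chunk_map_py
    rw [hm, pvLoopInvA boundaries hpre num_sentences.toNat]
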